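-- pv_equiv track=rewrite | github.com/TransparentDeveloper/Baekjoon-Algorithm | 프로그래머스/lv1/68935. 3진법 뒤집기/3진법 뒤집기.py | solution
-- ===== SOURCE A (Python) =====
-- def solution(n):
--     str_3 = ""
--     while n != 0:
--         str_3 = str(int(n%3))+str_3
--         n = int(n/3)
--
--     answer = 0
--     for idx,su in enumerate(str_3):
--         answer += int(su) * 3**idx
--     return answer
-- ===== SOURCE B (Python) =====
-- def solution(n):
--     answer = 0
--     while n != 0:
--         answer = answer * 3 + int(n % 3)
--         n = int(n / 3)
--     return answer
-- ===== Notes on version B (the rewrite author's own statement) =====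
-- stated objective: simpler
-- what changed: Replaces the two-pass build-a-base-3-string-then-parse-it-with-positional-powers approach by a single Horner-style arithmetic loop that accumulates the reversed-ternary value directly, with no intermediate string.
import Mathlib
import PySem

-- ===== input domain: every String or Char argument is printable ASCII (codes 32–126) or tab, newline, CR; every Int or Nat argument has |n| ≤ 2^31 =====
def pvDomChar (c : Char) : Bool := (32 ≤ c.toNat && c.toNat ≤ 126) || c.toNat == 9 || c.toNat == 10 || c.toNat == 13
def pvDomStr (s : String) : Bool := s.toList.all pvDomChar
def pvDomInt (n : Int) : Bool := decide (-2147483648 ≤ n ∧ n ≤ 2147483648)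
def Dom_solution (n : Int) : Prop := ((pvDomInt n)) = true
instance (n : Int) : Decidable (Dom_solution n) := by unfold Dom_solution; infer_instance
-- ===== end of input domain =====

-- B replaces A's two passes (build a base-3 string, then parse it with positional powers)
-- by one Horner-style arithmetic loop: simpler, no intermediate string.

-- termination fact for both loops: int(n/3) shrinks |n| when n ≠ 0
theorem pv_tdiv3_lt (n : Int) (h : ¬ n = 0) : (n.tdiv 3).natAbs < n.natAbs := by
  rw [Int.natAbs_tdiv]
  exact Nat.div_lt_self (by omega) (by norm_num)

-- ===== PORT A =====
-- while n != 0: str_3 = str(int(n%3)) + str_3; n = int(n/3)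
-- 'int(n/3)' truncates toward zero, which on |n| ≤ 2^31 (float-exact) is Int.tdiv;
-- 'int(n%3)' is the identity on the int n%3 = PySem.Int.mod n 3.
def solution_loop1 (n : Int) (str3 : String) : String :=
  if n = 0 then str3
  else solution_loop1 (n.tdiv 3) (PySem.Int.toStr (PySem.Int.mod n 3) ++ str3)
termination_by n.natAbs
decreasing_by exact pv_tdiv3_lt n (by assumption)

def solution (n : Int) : Int :=
  let str3 := solution_loop1 n ""
  -- for idx,su in enumerate(str_3): answer += int(su) * 3**idx
  -- int(su) via PySem.Int.ofStr? (never none: every su is '0','1' or '2'); idx ≥ 0 so 3**idx = 3 ^ idx.toNat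
  (PySem.List.enumerate str3.toList).foldl
    (fun answer p => answer + ((PySem.Int.ofStr? (String.singleton p.2)).getD 0) * 3 ^ p.1.toNat) 0

-- ===== PORT B =====
-- answer = 0; while n != 0: answer = answer*3 + int(n%3); n = int(n/3)
def solution_alt_loop (n : Int) (answer : Int) : Int :=
  if n = 0 then answer
  else solution_alt_loop (n.tdiv 3) (answer * 3 + PySem.Int.mod n 3)
termination_by n.natAbs
decreasing_by exact pv_tdiv3_lt n (by assumption)

def solution_alt (n : Int) : Int := solution_alt_loop n 0

-- ===== PRECONDITION & SPEC =====
def Spec_solution (n : Int) (out : Int) : Prop := out = solution_alt n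
instance (n : Int) (out : Int) : Decidable (Spec_solution n out) := by unfold Spec_solution; infer_instance

-- ===== CLAIM (what is proved, stated in full; the proofs are below) =====
def Claim_equal_solution : Prop := ∀ (n : Int), Dom_solution n → Spec_solution n (solution n)

-- ===== LEMMAS AND PROOFS =====

-- value of a single digit character, as A's inner loop reads it
def chVal (c : Char) : Int := (PySem.Int.ofStr? (String.singleton c)).getD 0

-- little-endian weighted value of a char list
def W : List Char → Int
  | [] => 0
  | c :: t => chVal c + 3 * W t

theorem foldl_enumerate_eq_W (l : List Char) (s : Nat) (a : Int) :
    (PySem.List.enumerate l (s : Int)).foldl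
      (fun answer p => answer + ((PySem.Int.ofStr? (String.singleton p.2)).getD 0) * 3 ^ p.1.toNat) a
      = a + 3 ^ s * W l := by
  induction l generalizing s a with
  | nil => simp [PySem.List.enumerate_nil, W]
  | cons c t ih =>
    rw [PySem.List.enumerate_cons]
    have h1 : ((s : Int) + 1) = ((s + 1 : Nat) : Int) := by push_cast; ring
    simp only [List.foldl_cons, h1, ih]
    show a + chVal c * 3 ^ ((s : Int)).toNat + 3 ^ (s + 1) * W t = a + 3 ^ s * W (c :: t)
    rw [Int.toNat_natCast, W]
    ring

theorem W_loop1 (n : Int) (acc : String) :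
    W (solution_loop1 n acc).toList = solution_alt_loop n (W acc.toList) := by
  induction n, acc using solution_loop1.induct with
  | case1 acc =>
    rw [solution_loop1, solution_alt_loop]
    simp
  | case2 n acc h ih =>
    rw [solution_loop1, solution_alt_loop, if_neg h, if_neg h, ih]
    have hme : PySem.Int.mod n 3 = n % 3 := PySem.Int.mod_eq_emod_of_pos (by norm_num)
    have hm : n % 3 = 0 ∨ n % 3 = 1 ∨ n % 3 = 2 := by omega
    have harg : W (PySem.Int.toStr (PySem.Int.mod n 3) ++ acc).toList
        = W acc.toList * 3 + PySem.Int.mod n 3 := by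
      rw [hme]
      have e0 : PySem.Int.toStr (0 : Int) = "0" := by decide
      have e1 : PySem.Int.toStr (1 : Int) = "1" := by decide
      have e2 : PySem.Int.toStr (2 : Int) = "2" := by decide
      have t0 : "0".toList = ['0'] := by decide
      have t1 : "1".toList = ['1'] := by decide
      have t2 : "2".toList = ['2'] := by decide
      have c0 : chVal '0' = 0 := by decide
      have c1 : chVal '1' = 1 := by decide
      have c2 : chVal '2' = 2 := by decide
      rcases hm with h0 | h0 <;> [skip; rcases h0 with h0 | h0] <;>
        rw [h0] <;>
        simp only [e0, e1, e2, String.toList_append, t0, t1, t2, List.cons_append, List.nil_append, W, c0, c1, c2] <;>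
        ring
    rw [harg]

-- ===== VERDICT (by name: the statement is the Claim_ definition above) =====
theorem solution_spec : Claim_equal_solution := by
  intro n _
  show solution n = solution_alt n
  unfold solution solution_alt
  have := foldl_enumerate_eq_W (solution_loop1 n "").toList 0 0
  simp only [Nat.cast_zero] at this
  rw [this, W_loop1]
  simp [W]
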